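-- pv_equiv track=rewrite | github.com/marwan2232004/Gate-Access-Controller | utils/image_preprocessing.py | get_horizontal_groups
-- ===== SOURCE A (Python) =====
-- def get_horizontal_groups(sorted_horizontal_contours):
--     groups = [[]]
--     group_idx = 0
--     overlap_threshold = 10
--     horizontal_threshold = 30  # define the maximum horizontal difference between two contours
--     for i in range(len(sorted_horizontal_contours)):
--
--         if len(groups[group_idx]) == 0:
--             groups[group_idx].append(sorted_horizontal_contours[i])
--             continue
--
--         current_x, _, current_w, _ = sorted_horizontal_contours[i]
--         last_x, _, last_w, _ = groups[group_idx][-1]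
--
--         right_horizontal_check = (
--                 last_x + last_w + horizontal_threshold > current_x > last_x + last_w - overlap_threshold)
--
--         if right_horizontal_check:
--             groups[group_idx].append(sorted_horizontal_contours[i])
--         else:
--             group_idx += 1
--             groups.append([sorted_horizontal_contours[i]])
--     return groups
-- ===== SOURCE B (Python) =====
-- def get_horizontal_groups(sorted_horizontal_contours):
--     xs = sorted_horizontal_contours
--     breaks = [
--         i for i in range(1, len(xs))
--         if not (xs[i - 1][0] + xs[i - 1][2] + 30 > xs[i][0] > xs[i - 1][0] + xs[i - 1][2] - 10)
--     ]
--     bounds = [0] + breaks + [len(xs)]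
--     return [xs[a:b] for a, b in zip(bounds, bounds[1:])]
-- ===== Notes on version B (the rewrite author's own statement) =====
-- stated objective: alternative
-- what changed: A walks the list once mutating groups[group_idx] with an in-loop empty-group special case; B first collects the break indices (consecutive pairs failing the adjacency check) and then materialises the groups by slicing the input between successive boundaries.
import Mathlib
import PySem

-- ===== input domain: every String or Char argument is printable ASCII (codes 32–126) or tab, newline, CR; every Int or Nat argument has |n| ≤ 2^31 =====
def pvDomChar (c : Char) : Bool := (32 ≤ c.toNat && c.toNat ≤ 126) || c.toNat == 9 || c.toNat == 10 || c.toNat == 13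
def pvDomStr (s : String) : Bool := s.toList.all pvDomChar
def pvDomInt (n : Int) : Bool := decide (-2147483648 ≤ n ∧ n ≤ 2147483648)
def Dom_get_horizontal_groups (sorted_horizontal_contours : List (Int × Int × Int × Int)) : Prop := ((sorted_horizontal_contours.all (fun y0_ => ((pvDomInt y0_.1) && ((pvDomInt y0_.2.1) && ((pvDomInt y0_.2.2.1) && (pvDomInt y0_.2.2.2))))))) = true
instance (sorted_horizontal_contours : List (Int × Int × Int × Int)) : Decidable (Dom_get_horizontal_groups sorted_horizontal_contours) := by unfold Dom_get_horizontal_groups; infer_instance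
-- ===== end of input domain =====

-- B collects the indices where the adjacency check fails between consecutive contours and then
-- slices the input between successive boundaries, instead of A's one pass mutating groups[group_idx];
-- same cost, different decomposition (break points + slicing vs incremental group building).

-- ===== PORT A =====
-- A's loop body as a named helper (the for-loop's body, verbatim); groups[group_idx] is read
-- with pyGetD (group_idx = groups.length - 1 throughout, always in range) and mutated with
-- List.set (group_idx ≥ 0 throughout, so .toNat is exact here).
def pvStepA (st : List (List (Int × Int × Int × Int)) × Int) (x : Int × Int × Int × Int) :
    List (List (Int × Int × Int × Int)) × Int :=
  let groups := st.1
  let group_idx := st.2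
  let cur := PySem.List.pyGetD groups group_idx []
  if cur.length = 0 then
    (groups.set group_idx.toNat (cur ++ [x]), group_idx)
  else
    let last := PySem.List.pyGetD cur (-1) (0, 0, 0, 0)
    if last.1 + last.2.2.1 + 30 > x.1 ∧ x.1 > last.1 + last.2.2.1 - 10 then
      (groups.set group_idx.toNat (cur ++ [x]), group_idx)
    else
      (groups ++ [[x]], group_idx + 1)

def get_horizontal_groups (sorted_horizontal_contours : List (Int × Int × Int × Int)) : List (List (Int × Int × Int × Int)) :=
  ((PySem.List.pyRange 0 (sorted_horizontal_contours.length : Int) 1).foldl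
    (fun st i => pvStepA st (PySem.List.pyGetD sorted_horizontal_contours i (0, 0, 0, 0)))
    ([[]], (0 : Int))).1

-- ===== PORT B =====
-- Source B: collect break indices (comprehension over range(1, len(xs)) filtered by the failing
-- adjacency check), form bounds = [0] + breaks + [len(xs)], slice between successive bounds.
def get_horizontal_groups_alt (sorted_horizontal_contours : List (Int × Int × Int × Int)) : List (List (Int × Int × Int × Int)) :=
  let xs := sorted_horizontal_contours
  let breaks := (PySem.List.pyRange 1 (xs.length : Int) 1).filter (fun i =>
    let prev := PySem.List.pyGetD xs (i - 1) (0, 0, 0, 0)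
    let cur := PySem.List.pyGetD xs i (0, 0, 0, 0)
    ! decide (prev.1 + prev.2.2.1 + 30 > cur.1 ∧ cur.1 > prev.1 + prev.2.2.1 - 10))
  let bounds := [(0 : Int)] ++ breaks ++ [(xs.length : Int)]
  (bounds.zip (PySem.List.slice bounds (some 1) none)).map
    (fun p => PySem.List.slice xs (some p.1) (some p.2))

-- ===== PRECONDITION & SPEC =====
def Spec_get_horizontal_groups (sorted_horizontal_contours : List (Int × Int × Int × Int)) (out : List (List (Int × Int × Int × Int))) : Prop := out = get_horizontal_groups_alt sorted_horizontal_contours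
instance (sorted_horizontal_contours : List (Int × Int × Int × Int)) (out : List (List (Int × Int × Int × Int))) : Decidable (Spec_get_horizontal_groups sorted_horizontal_contours out) := by unfold Spec_get_horizontal_groups; infer_instance

-- ===== CLAIM (what is proved, stated in full; the proofs are below) =====
def Claim_equal_get_horizontal_groups : Prop := ∀ (sorted_horizontal_contours : List (Int × Int × Int × Int)), Dom_get_horizontal_groups sorted_horizontal_contours → Spec_get_horizontal_groups sorted_horizontal_contours (get_horizontal_groups sorted_horizontal_contours)

-- ===== LEMMAS AND PROOFS =====

-- The adjacency check as a Bool.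
def pvChk (a b : Int × Int × Int × Int) : Bool :=
  decide (a.1 + a.2.2.1 + 30 > b.1 ∧ b.1 > a.1 + a.2.2.1 - 10)

-- Canonical recursive grouping both ports are reduced to.
-- pvG l ys = (rest of l's group drawn from ys, the following groups).
def pvG (l : Int × Int × Int × Int) : List (Int × Int × Int × Int) → List (Int × Int × Int × Int) × List (List (Int × Int × Int × Int))
  | [] => ([], [])
  | y :: ys =>
    let r := pvG y ys
    if l.1 + l.2.2.1 + 30 > y.1 ∧ y.1 > l.1 + l.2.2.1 - 10 then (y :: r.1, r.2)
    else ([], (y :: r.1) :: r.2)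

def pvF : List (Int × Int × Int × Int) → List (List (Int × Int × Int × Int))
  | [] => [[]]
  | x :: t => (x :: (pvG x t).1) :: (pvG x t).2

-- (d ++ [g]).set d.length v = d ++ [v]
theorem pv_set_concat {α : Type} (d : List α) (g v : α) :
    (d ++ [g]).set d.length v = d ++ [v] := by
  induction d with
  | nil => rfl
  | cons a d ih => simp [ih]

-- A's loop invariant.
theorem pv_a_inv (ys : List (Int × Int × Int × Int)) :
    ∀ (d : List (List (Int × Int × Int × Int))) (g : List (Int × Int × Int × Int))
      (l : Int × Int × Int × Int), g.getLast? = some l →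
    ys.foldl pvStepA
      (d ++ [g], (d.length : Int))
    = (d ++ ((g ++ (pvG l ys).1) :: (pvG l ys).2),
       ((d.length : Int) + ((pvG l ys).2.length : Int))) := by
  induction ys with
  | nil => intro d g l hl; simp [pvG]
  | cons y ys ih =>
    intro d g l hl
    have hgne : g ≠ [] := by intro h; subst h; simp at hl
    have hcur : PySem.List.pyGetD (d ++ [g]) (d.length : Int) ([] : List (Int × Int × Int × Int)) = g := by
      simp [PySem.List.pyGetD_natCast, List.getD_eq_getElem?_getD]
    have hlast : PySem.List.pyGetD g (-1) ((0 : Int), (0 : Int), (0 : Int), (0 : Int)) = l := by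
      rw [PySem.List.pyGetD_neg_one (h := hgne)]
      have h2 : g.getLast? = some (g.getLast hgne) := List.getLast?_eq_some_getLast hgne
      rw [h2] at hl; exact Option.some.inj hl
    simp only [List.foldl_cons, pvStepA, hcur, hlast]
    rw [if_neg (by simpa using hgne)]
    by_cases hchk : l.1 + l.2.2.1 + 30 > y.1 ∧ y.1 > l.1 + l.2.2.1 - 10
    · simp only [if_pos hchk, Int.toNat_natCast, pv_set_concat]
      rw [ih d (g ++ [y]) y (by simp)]
      simp [pvG, hchk, List.append_assoc]
    · simp only [if_neg hchk]
      have hlen : ((d.length : Int) + 1) = ((d ++ [g]).length : Int) := by simp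
      have := ih (d ++ [g]) [y] y (by simp)
      rw [show d ++ [g] ++ [[y]] = (d ++ [g]) ++ [[y]] from rfl, hlen, this]
      simp [pvG, hchk]
      omega

-- Port A computes pvF.
theorem pv_a_eq (xs : List (Int × Int × Int × Int)) : get_horizontal_groups xs = pvF xs := by
  unfold get_horizontal_groups
  rw [PySem.List.foldl_pyRange_zero_pyGetD' xs ((0 : Int), (0 : Int), (0 : Int), (0 : Int))]
  cases xs with
  | nil => rfl
  | cons x t =>
    simp only [List.foldl_cons]
    have h0 : PySem.List.pyGetD ([[]] : List (List (Int × Int × Int × Int))) (0 : Int) [] = [] := by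
      simp [PySem.List.pyGetD_zero]
    simp only [pvStepA, h0, List.length_nil, if_true, Int.toNat_zero, List.set_cons_zero, List.nil_append]
    have := pv_a_inv t [] [x] x (by simp)
    simp only [List.nil_append, List.length_nil, Nat.cast_zero] at this
    rw [this]
    simp [pvF]

-- ===== B-side reduction to Nat-indexed break points and chunks =====

def pvPredN (xs : List (Int × Int × Int × Int)) (i : Nat) : Bool :=
  ! pvChk (xs.getD (i - 1) (0, 0, 0, 0)) (xs.getD i (0, 0, 0, 0))

def pvBrkN (xs : List (Int × Int × Int × Int)) : List Nat :=
  (List.range' 1 (xs.length - 1)).filter (pvPredN xs)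

def pvChunksN (xs : List (Int × Int × Int × Int)) (L : List Nat) : List (List (Int × Int × Int × Int)) :=
  ((0 :: L).zip L).map (fun p => (xs.drop p.1).take (p.2 - p.1))





theorem pv_breaks_eq (xs : List (Int × Int × Int × Int)) :
    (PySem.List.pyRange 1 (xs.length : Int) 1).filter (fun i =>
      let prev := PySem.List.pyGetD xs (i - 1) (0, 0, 0, 0)
      let cur := PySem.List.pyGetD xs i (0, 0, 0, 0)
      ! decide (prev.1 + prev.2.2.1 + 30 > cur.1 ∧ cur.1 > prev.1 + prev.2.2.1 - 10))
    = (pvBrkN xs).map (fun k : Nat => (k : Int)) := by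
  unfold pvBrkN
  rw [PySem.List.pyRange_one, List.range'_eq_map_range]
  have hm : (((xs.length : Int)) - 1).toNat = xs.length - 1 := by omega
  rw [hm, List.filter_map, List.filter_map]
  simp only [List.map_map]
  have hp : ∀ k : Nat,
      ((fun i : Int =>
        let prev := PySem.List.pyGetD xs (i - 1) (0, 0, 0, 0)
        let cur := PySem.List.pyGetD xs i (0, 0, 0, 0)
        ! decide (prev.1 + prev.2.2.1 + 30 > cur.1 ∧ cur.1 > prev.1 + prev.2.2.1 - 10)) ∘
        (fun k : Nat => (1 : Int) + k)) k = (pvPredN xs ∘ (fun k => 1 + k)) k := by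
    intro k
    simp only [Function.comp, pvPredN, pvChk]
    have h2 : (1 : Int) + (k : Int) = ((1 + k : Nat) : Int) := by push_cast; ring
    simp only [h2, PySem.List.pyGetD_natCast]
    simp
  rw [funext hp]
  have hf : ((fun k : Nat => (k : Int)) ∘ (fun x : Nat => 1 + x)) = (fun k : Nat => (1 : Int) + k) := by
    funext k; simp [Function.comp]
  rw [hf]

theorem pv_alt_eq_chunks (xs : List (Int × Int × Int × Int)) :
    get_horizontal_groups_alt xs = pvChunksN xs (pvBrkN xs ++ [xs.length]) := by
  unfold get_horizontal_groups_alt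
  simp only [pv_breaks_eq, PySem.List.slice_from_one]
  have hb : ([(0 : Int)] ++ (pvBrkN xs).map (fun k : Nat => (k : Int)) ++ [(xs.length : Int)])
      = ((0 :: (pvBrkN xs ++ [xs.length])).map (fun k : Nat => (k : Int))) := by
    simp
  rw [hb]
  rw [show ((0 :: (pvBrkN xs ++ [xs.length])).map (fun k : Nat => (k : Int))).tail
      = ((pvBrkN xs ++ [xs.length]).map (fun k : Nat => (k : Int))) from rfl]
  rw [List.zip_map, List.map_map]
  unfold pvChunksN
  apply List.map_congr_left
  intro p _
  simp only [Function.comp, Prod.map]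
  rw [PySem.List.slice_natCast]

theorem pv_chunks_pairs (x : Int × Int × Int × Int) (s : List (Int × Int × Int × Int))
    (l : List (Nat × Nat)) :
    (l.map (Prod.map (1 + ·) (1 + ·))).map (fun p => ((x :: s).drop p.1).take (p.2 - p.1))
      = l.map (fun p => (s.drop p.1).take (p.2 - p.1)) := by
  rw [List.map_map]
  apply List.map_congr_left
  intro p _
  simp only [Function.comp, Prod.map]
  rw [Nat.add_comm 1 p.1, List.drop_succ_cons]
  congr 1
  omega

theorem pv_chunks_cons (s : List (Int × Int × Int × Int)) (c : Nat) (r : List Nat) :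
    pvChunksN s (c :: r) = s.take c :: ((c :: r).zip r).map (fun p => (s.drop p.1).take (p.2 - p.1)) := by
  unfold pvChunksN
  simp [List.zip_cons_cons]

theorem pv_shift_head (x : Int × Int × Int × Int) (s : List (Int × Int × Int × Int)) (c : Nat) (r : List Nat) :
    pvChunksN (x :: s) ((c :: r).map (1 + ·)) =
      (x :: s.take c) :: (((c :: r).zip r).map (fun p => (s.drop p.1).take (p.2 - p.1))) := by
  unfold pvChunksN
  rw [List.map_cons, List.zip_cons_cons, List.map_cons]
  rw [show ((1 + c) :: (r.map (1 + ·))) = (c :: r).map (1 + ·) from rfl]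
  rw [List.zip_map, pv_chunks_pairs]
  congr 1
  simp [Nat.add_comm 1 c]

theorem pv_shift_break (x : Int × Int × Int × Int) (s : List (Int × Int × Int × Int)) (c : Nat) (r : List Nat) :
    pvChunksN (x :: s) (1 :: (c :: r).map (1 + ·)) = [x] :: pvChunksN s (c :: r) := by
  unfold pvChunksN
  rw [List.map_cons, List.zip_cons_cons, List.zip_cons_cons, List.map_cons, List.map_cons]
  rw [show ((1 + c) :: (r.map (1 + ·))) = (c :: r).map (1 + ·) from rfl]
  rw [List.zip_map, pv_chunks_pairs]
  rw [List.zip_cons_cons, List.map_cons]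
  simp [Nat.add_comm 1 c]

theorem pv_brk_rec (x y : Int × Int × Int × Int) (ys : List (Int × Int × Int × Int)) :
    pvBrkN (x :: y :: ys) = (if pvChk x y then [] else [1]) ++ (pvBrkN (y :: ys)).map (1 + ·) := by
  unfold pvBrkN
  have hlen1 : (x :: y :: ys).length - 1 = ys.length + 1 := by simp
  have hlen2 : (y :: ys).length - 1 = ys.length := by simp
  rw [hlen1, hlen2, List.range'_succ, List.filter_cons]
  have hmap : List.range' 2 ys.length = (List.range' 1 ys.length).map (1 + ·) := by
    rw [List.map_add_range']
  rw [hmap, List.filter_map]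
  have hcongr : List.filter (pvPredN (x :: y :: ys) ∘ (1 + ·)) (List.range' 1 ys.length)
      = List.filter (pvPredN (y :: ys)) (List.range' 1 ys.length) := by
    apply List.filter_congr
    intro i hi
    have h1 : 1 ≤ i := (List.mem_range'_1.mp hi).1
    simp only [Function.comp]
    rw [Nat.add_comm 1 i]
    obtain ⟨j, rfl⟩ : ∃ j, i = j + 1 := ⟨i - 1, by omega⟩
    rfl
  rw [hcongr]
  have hhead : pvPredN (x :: y :: ys) 1 = !pvChk x y := rfl
  rw [hhead]
  by_cases hc : pvChk x y
  · simp [hc]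
  · simp [hc]

theorem pv_chunks_eq (xs : List (Int × Int × Int × Int)) :
    pvChunksN xs (pvBrkN xs ++ [xs.length]) = pvF xs := by
  induction xs with
  | nil => rfl
  | cons x t ih =>
    cases t with
    | nil => simp [pvChunksN, pvBrkN, pvF, pvG]
    | cons y ys =>
      rw [pv_brk_rec]
      obtain ⟨c, r, hcr⟩ : ∃ c r, pvBrkN (y :: ys) ++ [(y :: ys).length] = c :: r := by
        cases h : pvBrkN (y :: ys) with
        | nil => exact ⟨(y :: ys).length, [], by simp⟩
        | cons a l => exact ⟨a, l ++ [(y :: ys).length], by simp⟩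
      have hlist : (((if pvChk x y then [] else [1]) ++ (pvBrkN (y :: ys)).map (1 + ·)) ++ [(x :: y :: ys).length])
          = (if pvChk x y then [] else [1]) ++ ((c :: r).map (1 + ·)) := by
        rw [← hcr]
        simp [Nat.add_comm]
      rw [hlist]
      rw [hcr, pv_chunks_cons] at ih
      by_cases hc : pvChk x y
      · rw [if_pos hc, List.nil_append, pv_shift_head]
        have hchk : x.1 + x.2.2.1 + 30 > y.1 ∧ y.1 > x.1 + x.2.2.1 - 10 := by
          simpa [pvChk] using hc
        have hF : pvF (y :: ys) = (y :: (pvG y ys).1) :: (pvG y ys).2 := rfl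
        rw [hF] at ih
        obtain ⟨h1, h2⟩ := List.cons.inj ih
        rw [h1, h2]
        simp [pvF, pvG, hchk]
      · rw [if_neg hc, List.singleton_append, pv_shift_break, pv_chunks_cons, ih]
        have hchk : ¬(x.1 + x.2.2.1 + 30 > y.1 ∧ y.1 > x.1 + x.2.2.1 - 10) := by
          simpa [pvChk] using hc
        simp [pvF, pvG, hchk]

theorem pv_b_eq (xs : List (Int × Int × Int × Int)) : get_horizontal_groups_alt xs = pvF xs := by
  rw [pv_alt_eq_chunks, pv_chunks_eq]

-- ===== VERDICT (by name: the statement is the Claim_ definition above) =====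
theorem get_horizontal_groups_spec : Claim_equal_get_horizontal_groups := by
  intro xs _
  unfold Spec_get_horizontal_groups
  rw [pv_a_eq, pv_b_eq]
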